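-- pv_equiv track=rewrite | github.com/michal-wegrzyn/advent_of_code | 2024/Day22/part2.py | differences_to_price
-- ===== SOURCE A (Python) =====
-- def mix(secret: int, number: int) -> int:
--     return secret ^ number
--
-- def prune(secret: int) -> int:
--     return secret % 16777216
--
-- def next_secret(secret: int) -> int:
--     secret = prune(mix(secret, secret * 64))
--     secret = prune(mix(secret, secret // 32))
--     secret = prune(mix(secret, secret * 2048))
--     return secret
--
-- def get_prices_sequence(secret: int, length: int) -> list[int]:
--     return [value % 10 for value in get_sequence(secret, length)]
--
-- def get_sequence(secret: int, length: int) -> list[int]: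
--     return [secret] + [secret := next_secret(secret) for _ in range(length - 1)]
--
-- def get_differences(sequence: list[int]) -> list[int]:
--     return [sequence[i + 1] - sequence[i] for i in range(len(sequence) - 1)]
--
-- def differences_to_price(secret: int, length: int) -> dict[tuple[int, ...], int]:
--     sequence: list[int] = get_prices_sequence(secret, length)
--     differences: list[int] = get_differences(sequence)
--     answer: dict[tuple[int, ...], int] = {}
--     diffs: tuple[int, ...]
--     for i in range(4, len(sequence)):
--         diffs = tuple(differences[i - 4 : i])
--         if not diffs in answer:
--             answer[diffs] = sequence[i]
--     return answer
-- ===== SOURCE B (Python) =====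
-- def mix(secret: int, number: int) -> int:
--     return secret ^ number
--
-- def prune(secret: int) -> int:
--     return secret % 16777216
--
-- def next_secret(secret: int) -> int:
--     secret = prune(mix(secret, secret * 64))
--     secret = prune(mix(secret, secret // 32))
--     secret = prune(mix(secret, secret * 2048))
--     return secret
--
-- def differences_to_price(secret: int, length: int) -> dict[tuple[int, ...], int]:
--     # One streaming pass: generate each secret, its price and the new difference,
--     # keep a rolling window of the last four differences, record first occurrences.
--     answer: dict[tuple[int, ...], int] = {}
--     prev_price = secret % 10
--     window: tuple[int, ...] = ()
--     for _ in range(length - 1):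
--         secret = next_secret(secret)
--         price = secret % 10
--         window = (window + (price - prev_price,))[-4:]
--         if len(window) == 4:
--             answer.setdefault(window, price)
--         prev_price = price
--     return answer
-- ===== Notes on version B (the rewrite author's own statement) =====
-- stated objective: simpler
-- what changed: B fuses secret generation, price differencing, windowing and first-occurrence recording into one streaming loop with a rolling 4-element window, instead of A's three full intermediate lists plus an index loop with slicing.
import Mathlib
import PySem

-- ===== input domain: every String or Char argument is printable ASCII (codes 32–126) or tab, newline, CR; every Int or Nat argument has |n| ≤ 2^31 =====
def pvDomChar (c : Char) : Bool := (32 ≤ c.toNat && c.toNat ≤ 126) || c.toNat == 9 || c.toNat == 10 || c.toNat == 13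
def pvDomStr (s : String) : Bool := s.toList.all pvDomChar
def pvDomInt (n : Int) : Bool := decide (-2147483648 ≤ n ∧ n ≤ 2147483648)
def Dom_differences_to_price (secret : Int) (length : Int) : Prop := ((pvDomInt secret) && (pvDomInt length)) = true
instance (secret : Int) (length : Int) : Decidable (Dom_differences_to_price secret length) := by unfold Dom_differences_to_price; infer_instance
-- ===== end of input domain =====

-- B fuses generation, differencing, windowing and recording into one streaming pass
-- with a rolling window of the last four differences (objective: simpler, no speed claim).

-- ===== PORT A =====
def pvMix (secret number : Int) : Int := PySem.Int.bxor secret number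

def pvPrune (secret : Int) : Int := PySem.Int.mod secret 16777216

def pvNextSecret (secret : Int) : Int :=
  let s1 := pvPrune (pvMix secret (secret * 64))
  let s2 := pvPrune (pvMix s1 (PySem.Int.floordiv s1 32))
  pvPrune (pvMix s2 (s2 * 2048))

-- the walrus comprehension [secret := next_secret(secret) for _ in range(length-1)]
def pvSeqAux (secret : Int) : Nat → List Int
  | 0 => []
  | n + 1 => let s := pvNextSecret secret; s :: pvSeqAux s n

def pvGetSequence (secret length : Int) : List Int :=
  secret :: pvSeqAux secret (length - 1).toNat

def pvGetPricesSequence (secret length : Int) : List Int :=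
  (pvGetSequence secret length).map (fun v => PySem.Int.mod v 10)

def pvGetDifferences (sequence : List Int) : List Int :=
  (PySem.List.pyRange 0 ((sequence.length : Int) - 1) 1).map
    (fun i => PySem.List.pyGetD sequence (i + 1) 0 - PySem.List.pyGetD sequence i 0)

def differences_to_price (secret : Int) (length : Int) : List (List Int × Int) :=
  let sequence := pvGetPricesSequence secret length
  let differences := pvGetDifferences sequence
  let answer := (PySem.List.pyRange 4 (sequence.length : Int) 1).foldl
      (fun (ans : PySem.Dict (List Int) Int) i =>
        let diffs := PySem.List.slice differences (some (i - 4)) (some i)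
        if !(ans.contains diffs) then ans.insert diffs (PySem.List.pyGetD sequence i 0) else ans)
      PySem.Dict.empty
  answer.items

-- ===== PORT B =====
-- the 'for _ in range(length-1)' loop of Source B, carrying (secret, prev_price, window, answer)
def pvRunB (secret prevPrice : Int) (window : List Int) (answer : PySem.Dict (List Int) Int) :
    Nat → PySem.Dict (List Int) Int
  | 0 => answer
  | n + 1 =>
    let s := pvNextSecret secret
    let price := PySem.Int.mod s 10
    let w := PySem.List.slice (window ++ [price - prevPrice]) (some (-4)) none
    let ans := if w.length == 4 then answer.setdefault w price else answer
    pvRunB s price w ans n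

def differences_to_price_alt (secret : Int) (length : Int) : List (List Int × Int) :=
  (pvRunB secret (PySem.Int.mod secret 10) [] PySem.Dict.empty (length - 1).toNat).items

-- ===== PRECONDITION & SPEC =====
def Spec_differences_to_price (secret : Int) (length : Int) (out : List (List Int × Int)) : Prop := out = differences_to_price_alt secret length
instance (secret : Int) (length : Int) (out : List (List Int × Int)) : Decidable (Spec_differences_to_price secret length out) := by unfold Spec_differences_to_price; infer_instance

-- ===== CLAIM (what is proved, stated in full; the proofs are below) =====
def Claim_equal_differences_to_price : Prop := ∀ (secret : Int) (length : Int), Dom_differences_to_price secret length → Spec_differences_to_price secret length (differences_to_price secret length)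

-- ===== LEMMAS AND PROOFS =====

-- xs[-4:]
def pvLast4 (xs : List Int) : List Int := xs.drop (xs.length - 4)

-- the successive differences of prev :: l
def pvDiffsOf (prev : Int) : List Int → List Int
  | [] => []
  | p :: l => (p - prev) :: pvDiffsOf p l

-- reference loop over an explicit price list
def pvGo (ans : PySem.Dict (List Int) Int) (window : List Int) (prev : Int) :
    List Int → PySem.Dict (List Int) Int
  | [] => ans
  | p :: rest =>
    let w := pvLast4 (window ++ [p - prev])
    let ans' := if w.length == 4 then ans.setdefault w p else ans
    pvGo ans' w p rest

theorem pvRunB_eq_go (n : Nat) : ∀ (secret prev : Int) (window : List Int) (ans : PySem.Dict (List Int) Int),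
    pvRunB secret prev window ans n
      = pvGo ans window prev ((pvSeqAux secret n).map (fun v => PySem.Int.mod v 10)) := by
  induction n with
  | zero => intro secret prev window ans; rfl
  | succ n ih =>
    intro secret prev window ans
    show pvRunB secret prev window ans (n+1) = _
    rw [pvRunB, pvSeqAux]
    simp only [List.map_cons, pvGo]
    rw [PySem.List.slice_from_neg_ofNat _ 4 (by omega), ih]
    rfl

theorem pvLast4_length (xs : List Int) : (pvLast4 xs).length = min xs.length 4 := by
  simp [pvLast4]; omega

theorem pvLast4_append_last4 (xs ys : List Int) :
    pvLast4 (pvLast4 xs ++ ys) = pvLast4 (xs ++ ys) := by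
  unfold pvLast4
  rw [List.drop_append, List.drop_append, List.drop_drop]
  simp only [List.length_append, List.length_drop]
  congr 1
  · congr 1
    omega
  · congr 1
    omega

theorem pvLast4_of_le (xs : List Int) (h : xs.length ≤ 4) : pvLast4 xs = xs := by
  simp [pvLast4, Nat.sub_eq_zero_of_le h]

theorem pvDiffsOf_length (prev : Int) (l : List Int) : (pvDiffsOf prev l).length = l.length := by
  induction l generalizing prev with
  | nil => rfl
  | cons p l ih => simp [pvDiffsOf, ih]

theorem pvDiffsOf_getElem (prev : Int) (l : List Int) (k : Nat) (hk : k < l.length) :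
    (pvDiffsOf prev l)[k]'(by rw [pvDiffsOf_length]; exact hk)
      = l[k] - (prev :: l)[k]'(by simpa using Nat.lt_succ_of_lt hk) := by
  induction l generalizing prev k with
  | nil => simp at hk
  | cons p l ih =>
    cases k with
    | zero => rfl
    | succ k => simpa [pvDiffsOf] using ih p k (by simpa using hk)

theorem pvDiffsOf_append (prev : Int) (l : List Int) (p : Int) :
    pvDiffsOf prev (l ++ [p]) = pvDiffsOf prev l ++ [p - (prev :: l).getLast (by simp)] := by
  induction l generalizing prev with
  | nil => rfl
  | cons q l ih => simp [pvDiffsOf, ih]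

theorem pvGetDifferences_eq (prev : Int) (l : List Int) :
    pvGetDifferences (prev :: l) = pvDiffsOf prev l := by
  apply List.ext_getElem
  · simp [pvGetDifferences, PySem.List.length_pyRange_one, pvDiffsOf_length]
  · intro k h1 h2
    have hk : k < l.length := by rw [pvDiffsOf_length] at h2; exact h2
    rw [pvDiffsOf_getElem prev l k hk]
    simp only [pvGetDifferences, List.getElem_map, PySem.List.getElem_pyRange_one, zero_add]
    have hcast : ((k : Int)) + 1 = ((k + 1 : Nat) : Int) := by push_cast; ring
    rw [hcast, PySem.List.pyGetD_natCast, PySem.List.pyGetD_natCast]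
    have h1 : k + 1 < (prev :: l).length := by simp; omega
    have h2' : k < (prev :: l).length := by simp; omega
    rw [List.getD_eq_getElem _ _ h1, List.getD_eq_getElem _ _ h2']
    simp

theorem pvGo_short (l : List Int) : ∀ (ans : PySem.Dict (List Int) Int) (w : List Int) (prev : Int),
    w.length + l.length ≤ 3 → pvGo ans w prev l = ans := by
  induction l with
  | nil => intro ans w prev _; rfl
  | cons p l ih =>
    intro ans w prev h
    simp only [pvGo]
    have hw : (pvLast4 (w ++ [p - prev])).length = w.length + 1 := by
      rw [pvLast4_length]; simp at h ⊢; omega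
    rw [if_neg (by simp [hw]; simp at h; omega)]
    exact ih ans _ p (by simp at h ⊢; omega)

theorem pvGo_append (l1 : List Int) : ∀ (l2 : List Int) (ans : PySem.Dict (List Int) Int) (w : List Int) (prev : Int),
    w.length ≤ 4 →
    pvGo ans w prev (l1 ++ l2)
      = pvGo (pvGo ans w prev l1) (pvLast4 (w ++ pvDiffsOf prev l1)) ((prev :: l1).getLast (by simp)) l2 := by
  induction l1 with
  | nil =>
    intro l2 ans w prev hw
    simp only [List.nil_append, pvGo, pvDiffsOf, List.append_nil, List.getLast_singleton]
    rw [pvLast4_of_le w hw]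
  | cons p l1 ih =>
    intro l2 ans w prev hw
    simp only [List.cons_append, pvGo, pvDiffsOf]
    rw [ih _ _ _ _ (by rw [pvLast4_length]; omega)]
    have hwin : pvLast4 (pvLast4 (w ++ [p - prev]) ++ pvDiffsOf p l1)
        = pvLast4 (w ++ (p - prev) :: pvDiffsOf p l1) := by
      rw [pvLast4_append_last4]
      congr 1
      simp
    rw [hwin, List.getLast_cons_cons]

-- A's fold, abstracted over the price list
def pvFoldA (seq : List Int) : PySem.Dict (List Int) Int :=
  (PySem.List.pyRange 4 (seq.length : Int) 1).foldl
    (fun (ans : PySem.Dict (List Int) Int) i =>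
      let diffs := PySem.List.slice (pvGetDifferences seq) (some (i - 4)) (some i)
      if !(ans.contains diffs) then ans.insert diffs (PySem.List.pyGetD seq i 0) else ans)
    PySem.Dict.empty

theorem pvMain (l : List Int) (first : Int) :
    pvFoldA (first :: l) = pvGo PySem.Dict.empty [] first l := by
  induction l using List.reverseRecOn with
  | nil =>
    rw [pvFoldA, PySem.List.pyRange_one_eq_nil (by simp)]
    rfl
  | append_singleton l p ih =>
    by_cases hlen : l.length < 3
    · rw [pvFoldA, PySem.List.pyRange_one_eq_nil (by simp; omega)]
      rw [pvGo_short (l ++ [p]) _ _ _ (by simp; omega)]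
      rfl
    · push_neg at hlen
      have hN : ((first :: (l ++ [p])).length : Int) = (l.length : Int) + 2 := by simp; omega
      rw [pvFoldA, hN]
      rw [show ((l.length : Int) + 2) = ((l.length : Int) + 1) + 1 by ring,
        PySem.List.pyRange_one_succ_right (by omega), List.foldl_append]
      -- the prefix part agrees with pvFoldA (first :: l)
      have hpref : (PySem.List.pyRange 4 ((l.length : Int) + 1) 1).foldl
          (fun (ans : PySem.Dict (List Int) Int) i =>
            let diffs := PySem.List.slice (pvGetDifferences (first :: (l ++ [p]))) (some (i - 4)) (some i)
            if !(ans.contains diffs) then ans.insert diffs (PySem.List.pyGetD (first :: (l ++ [p])) i 0) else ans)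
          PySem.Dict.empty = pvFoldA (first :: l) := by
        rw [pvFoldA]
        rw [show ((first :: l).length : Int) = (l.length : Int) + 1 by simp]
        apply PySem.List.foldl_congr_mem
        intro ans i hi
        rw [PySem.List.mem_pyRange_one] at hi
        obtain ⟨k, rfl⟩ : ∃ k : Nat, i = (k : Int) := ⟨i.toNat, by omega⟩
        have hk4 : 4 ≤ k := by exact_mod_cast hi.1
        have hkl : k ≤ l.length := by omega
        have hcast : (k : Int) - 4 = ((k - 4 : Nat) : Int) := by omega
        rw [hcast, PySem.List.slice_natCast, PySem.List.slice_natCast,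
          pvGetDifferences_eq, pvGetDifferences_eq, pvDiffsOf_append,
          PySem.List.pyGetD_natCast, PySem.List.pyGetD_natCast]
        have hdl : (pvDiffsOf first l).length = l.length := pvDiffsOf_length first l
        rw [List.drop_append_of_le_length (by omega),
          List.take_append_of_le_length (by rw [List.length_drop, hdl]; omega)]
        have hget : (first :: (l ++ [p])).getD k 0 = (first :: l).getD k 0 := by
          cases k with
          | zero => omega
          | succ k =>
            have hkl' : k < l.length := by omega
            have e1 : k + 1 < (first :: (l ++ [p])).length := by
              simp only [List.length_cons, List.length_append, List.length_nil]; omega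
            have e2 : k + 1 < (first :: l).length := by
              simp only [List.length_cons]; omega
            rw [List.getD_eq_getElem _ _ e1, List.getD_eq_getElem _ _ e2]
            simp only [List.getElem_cons_succ]
            exact List.getElem_append_left hkl'
        rw [hget]
      rw [hpref, ih]
      -- the last appended index
      rw [pvGo_append l [p] PySem.Dict.empty [] first (by simp)]
      simp only [pvGo, List.nil_append]
      have hL : (pvDiffsOf first (l ++ [p])).length = l.length + 1 := by
        rw [pvDiffsOf_length]; simp
      have hkey : PySem.List.slice (pvGetDifferences (first :: (l ++ [p])))
            (some ((l.length : Int) + 1 - 4)) (some ((l.length : Int) + 1))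
          = pvLast4 (pvDiffsOf first (l ++ [p])) := by
        rw [pvGetDifferences_eq]
        rw [show (l.length : Int) + 1 - 4 = ((l.length - 3 : Nat) : Int) by omega,
          show (l.length : Int) + 1 = ((l.length + 1 : Nat) : Int) by omega,
          PySem.List.slice_natCast]
        have ht : ((pvDiffsOf first (l ++ [p])).drop (l.length - 3)).length ≤ 4 := by
          rw [List.length_drop, hL]
          omega
        rw [show l.length + 1 - (l.length - 3) = 4 from by omega, List.take_of_length_le ht]
        unfold pvLast4
        congr 1
        rw [hL]
        omega
      have hw : pvLast4 ([] ++ pvDiffsOf first l) ++ [p - (first :: l).getLast (by simp)]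
          = pvLast4 (pvDiffsOf first l) ++ [p - (first :: l).getLast (by simp)] := by
        simp
      have hwkey : pvLast4 (pvLast4 (pvDiffsOf first l) ++ [p - (first :: l).getLast (by simp)])
          = pvLast4 (pvDiffsOf first (l ++ [p])) := by
        rw [pvLast4_append_last4, ← pvDiffsOf_append]
      have hwlen : (pvLast4 (pvDiffsOf first (l ++ [p]))).length = 4 := by
        rw [pvLast4_length, hL]; omega
      have hval : PySem.List.pyGetD (first :: (l ++ [p])) ((l.length : Int) + 1) 0 = p := by
        rw [show (l.length : Int) + 1 = ((l.length + 1 : Nat) : Int) by omega,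
          PySem.List.pyGetD_natCast]
        rw [List.getD_eq_getElem _ _ (by simp only [List.length_cons, List.length_append, List.length_cons, List.length_nil]; omega)]
        simp only [List.getElem_cons_succ]
        rw [List.getElem_append_right (by omega)]
        simp
      simp only [List.foldl_cons, List.foldl_nil, hkey, hval, hwkey, hwlen]
      rw [if_pos (show ((4:Nat) == 4) = true from rfl)]
      by_cases hc : (pvGo PySem.Dict.empty [] first l).contains (pvLast4 (pvDiffsOf first (l ++ [p]))) = true
      · rw [PySem.Dict.setdefault_of_contains _ p hc, hc]
        simp
      · have hc' : (pvGo PySem.Dict.empty [] first l).contains (pvLast4 (pvDiffsOf first (l ++ [p]))) = false := by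
          simpa using hc
        rw [PySem.Dict.setdefault_of_not_contains _ p hc', hc']
        simp

theorem pvPrices_cons (secret length : Int) :
    pvGetPricesSequence secret length
      = PySem.Int.mod secret 10
        :: ((pvSeqAux secret (length - 1).toNat).map (fun v => PySem.Int.mod v 10)) := by
  simp [pvGetPricesSequence, pvGetSequence]

-- ===== VERDICT (by name: the statement is the Claim_ definition above) =====
theorem differences_to_price_spec : Claim_equal_differences_to_price := by
  intro secret length _
  unfold Spec_differences_to_price differences_to_price differences_to_price_alt
  rw [pvRunB_eq_go]
  have : pvFoldA (pvGetPricesSequence secret length)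
      = pvGo PySem.Dict.empty [] (PySem.Int.mod secret 10)
          ((pvSeqAux secret (length - 1).toNat).map (fun v => PySem.Int.mod v 10)) := by
    rw [pvPrices_cons]
    exact pvMain _ _
  rw [← this]
  rfl
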